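-- pv_equiv track=rewrite | github.com/filestack/filestack-python | filestack/utils/intelligent_ingestion.py | _get_byte_ranges
-- ===== SOURCE A (Python) =====
-- def _get_byte_ranges(filesize, part_size, start=0, bytes_to_read=None):
--     if bytes_to_read is None:
--         bytes_to_read = filesize
--
--     ranges = []
--     pos = start
--
--     while bytes_to_read > 0:
--         point = {'seek': pos}
--         if bytes_to_read > part_size:
--             size = part_size
--             bytes_to_read -= part_size
--             pos += part_size
--         else:
--             size = bytes_to_read
--             bytes_to_read = 0
--         point['size'] = size
--         ranges.append(point)
--
--     return ranges
-- ===== SOURCE B (Python) =====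
-- def _get_byte_ranges(filesize, part_size, start=0, bytes_to_read=None):
--     if bytes_to_read is None:
--         bytes_to_read = filesize
--     if bytes_to_read <= 0:
--         return []
--     num_parts = -(-bytes_to_read // part_size)  # ceil division
--     return [{'seek': start + i * part_size,
--              'size': min(part_size, bytes_to_read - i * part_size)}
--             for i in range(num_parts)]
-- ===== Notes on version B (the rewrite author's own statement) =====
-- stated objective: alternative
-- what changed: Replaces A's while-loop mutating pos/bytes_to_read with a closed-form ceil-division part count and a single indexed comprehension computing each range's seek/size arithmetically.
import Mathlib
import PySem

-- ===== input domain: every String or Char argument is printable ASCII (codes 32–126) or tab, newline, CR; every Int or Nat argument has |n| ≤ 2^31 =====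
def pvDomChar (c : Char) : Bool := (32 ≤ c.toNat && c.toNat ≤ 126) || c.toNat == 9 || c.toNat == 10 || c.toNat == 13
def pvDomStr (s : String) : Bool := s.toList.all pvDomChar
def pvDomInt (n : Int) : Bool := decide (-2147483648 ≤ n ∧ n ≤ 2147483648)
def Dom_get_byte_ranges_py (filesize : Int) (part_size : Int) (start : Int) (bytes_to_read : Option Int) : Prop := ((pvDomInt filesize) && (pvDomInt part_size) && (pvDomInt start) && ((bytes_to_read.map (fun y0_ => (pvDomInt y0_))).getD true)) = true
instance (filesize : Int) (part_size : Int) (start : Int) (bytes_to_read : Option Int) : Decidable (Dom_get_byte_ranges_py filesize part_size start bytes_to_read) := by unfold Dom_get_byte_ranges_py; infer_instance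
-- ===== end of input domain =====

-- B replaces A's while-loop over mutated pos/bytes_to_read with a closed-form part
-- count (ceil division) and a single indexed comprehension (objective: alternative).

-- ===== PORT A =====
-- A's while loop: state = (ranges, pos, bytes_to_read); fuel only makes the
-- recursion total (it is btr.toNat+1, enough whenever part_size > 0, i.e. on Pre_).
def goA (part_size : Int) (ranges : List (List (String × Int)))
    (pos btr : Int) : Nat → List (List (String × Int))
  | 0 => ranges
  | fuel + 1 =>
    if btr > 0 then
      if btr > part_size then
        goA part_size (ranges ++ [[("seek", pos), ("size", part_size)]])
          (pos + part_size) (btr - part_size) fuel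
      else
        ranges ++ [[("seek", pos), ("size", btr)]]
    else ranges

def get_byte_ranges_py (filesize : Int) (part_size : Int) (start : Int) (bytes_to_read : Option Int) : List (List (String × Int)) :=
  let btr := bytes_to_read.getD filesize
  goA part_size [] start btr (btr.toNat + 1)

-- ===== PORT B =====
def get_byte_ranges_py_alt (filesize : Int) (part_size : Int) (start : Int) (bytes_to_read : Option Int) : List (List (String × Int)) :=
  let btr := bytes_to_read.getD filesize
  if btr ≤ 0 then []
  else
    let num_parts := -(PySem.Int.floordiv (-btr) part_size)
    (PySem.List.pyRange 0 num_parts 1).map (fun i =>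
      [("seek", start + i * part_size), ("size", min part_size (btr - i * part_size))])

-- ===== PRECONDITION & SPEC =====
-- Pre_ excludes exactly the inputs where A never returns (its loop diverges when the
-- effective bytes_to_read is positive but part_size ≤ 0); B raises/returns [] there.
def Pre_get_byte_ranges_py (filesize : Int) (part_size : Int) (start : Int) (bytes_to_read : Option Int) : Prop :=
  0 < part_size ∨ (bytes_to_read.getD filesize) ≤ 0
instance (filesize : Int) (part_size : Int) (start : Int) (bytes_to_read : Option Int) : Decidable (Pre_get_byte_ranges_py filesize part_size start bytes_to_read) := by unfold Pre_get_byte_ranges_py; infer_instance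
def pvWitness_get_byte_ranges_py : Int × Int × Int × Option Int := (10, 3, 0, none)

def Spec_get_byte_ranges_py (filesize : Int) (part_size : Int) (start : Int) (bytes_to_read : Option Int) (out : List (List (String × Int))) : Prop := out = get_byte_ranges_py_alt filesize part_size start bytes_to_read
instance (filesize : Int) (part_size : Int) (start : Int) (bytes_to_read : Option Int) (out : List (List (String × Int))) : Decidable (Spec_get_byte_ranges_py filesize part_size start bytes_to_read out) := by unfold Spec_get_byte_ranges_py; infer_instance

-- ===== CLAIM (what is proved, stated in full; the proofs are below) =====
def Claim_equal_get_byte_ranges_py : Prop := ∀ (filesize : Int) (part_size : Int) (start : Int) (bytes_to_read : Option Int), Dom_get_byte_ranges_py filesize part_size start bytes_to_read → Pre_get_byte_ranges_py filesize part_size start bytes_to_read → Spec_get_byte_ranges_py filesize part_size start bytes_to_read (get_byte_ranges_py filesize part_size start bytes_to_read)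

-- ===== LEMMAS AND PROOFS =====

-- ceil division -(-a // b)
def cdiv (a b : Int) : Int := -(PySem.Int.floordiv (-a) b)

lemma cdiv_nonpos {a b : Int} (ha : a ≤ 0) (hb : 0 < b) : cdiv a b ≤ 0 := by
  unfold cdiv
  rw [PySem.Int.floordiv_eq_ediv_of_pos hb]
  have : 0 ≤ (-a) / b := Int.ediv_nonneg (by omega) (by omega)
  omega

lemma cdiv_bounds {a b : Int} (hb : 0 < b) : (cdiv a b - 1) * b < a ∧ a ≤ cdiv a b * b := by
  have h := (PySem.Int.neg_floordiv_neg_eq_iff_of_pos (a := a) (b := b) (q := cdiv a b) hb).mp rfl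
  exact h

lemma cdiv_last {a b : Int} (hb : 0 < b) (h1 : 0 < a) (h2 : a ≤ b) : cdiv a b = 1 := by
  exact (PySem.Int.neg_floordiv_neg_eq_iff_of_pos hb).mpr (by constructor <;> nlinarith)

lemma cdiv_step {a b : Int} (hb : 0 < b) (h : b < a) : cdiv a b = cdiv (a - b) b + 1 := by
  obtain ⟨l, r⟩ := cdiv_bounds (a := a - b) hb
  exact (PySem.Int.neg_floordiv_neg_eq_iff_of_pos hb).mpr (by constructor <;> nlinarith)

lemma map_pyRange_shift (f : Int → List (String × Int)) (n : Int) (hn : 0 ≤ n) :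
    (PySem.List.pyRange 0 (n + 1) 1).map f
      = f 0 :: (PySem.List.pyRange 0 n 1).map (fun i => f (i + 1)) := by
  rw [PySem.List.pyRange_one, PySem.List.pyRange_one]
  have h1 : (n + 1 - 0).toNat = (n - 0).toNat + 1 := by omega
  rw [h1, List.range_succ_eq_map]
  simp [List.map_map, Function.comp]

lemma goA_spec (ps : Int) (hps : 0 < ps) :
    ∀ (fuel : Nat) (btr : Int), btr.toNat ≤ fuel → ∀ (pos : Int) (ranges : List (List (String × Int))),
    goA ps ranges pos btr fuel
      = ranges ++ (PySem.List.pyRange 0 (cdiv btr ps) 1).map (fun i =>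
          [("seek", pos + i * ps), ("size", min ps (btr - i * ps))]) := by
  intro fuel
  induction fuel with
  | zero =>
    intro btr hbtr pos ranges
    have hb : btr ≤ 0 := by omega
    rw [PySem.List.pyRange_one_eq_nil (cdiv_nonpos hb hps)]
    simp [goA]
  | succ fuel ih =>
    intro btr hbtr pos ranges
    by_cases h0 : btr > 0
    · by_cases h1 : btr > ps
      · have hrec := ih (btr - ps) (by omega) (pos + ps)
          (ranges ++ [[("seek", pos), ("size", ps)]])
        rw [goA]
        simp only [h0, h1, if_true]
        rw [hrec, cdiv_step hps h1]
        have hn : 0 ≤ cdiv (btr - ps) ps := by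
          by_contra hc
          have := PySem.List.pyRange_one_eq_nil (a := (0:Int)) (b := cdiv (btr - ps) ps + 1) (by omega)
          obtain ⟨l, _⟩ := cdiv_bounds (a := btr - ps) hps
          nlinarith [cdiv_bounds (a := btr - ps) (b := ps) hps]
        rw [map_pyRange_shift _ _ hn]
        have hmin : min ps btr = ps := by omega
        simp [hmin, List.append_assoc]
        intro a _ _
        constructor
        · ring
        · congr 1; ring
      · rw [goA]
        simp only [h0, if_true, h1, if_false]
        rw [cdiv_last hps h0 (by omega)]
        have hr : PySem.List.pyRange 0 1 1 = [(0:Int)] := by decide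
        rw [hr]
        simp
        omega
    · rw [goA]
      simp only [h0, if_false]
      rw [PySem.List.pyRange_one_eq_nil (cdiv_nonpos (by omega) hps)]
      simp

-- ===== VERDICT (by name: the statement is the Claim_ definition above) =====
theorem get_byte_ranges_py_spec : Claim_equal_get_byte_ranges_py := by
  intro filesize part_size start bytes_to_read _ hpre
  unfold Spec_get_byte_ranges_py get_byte_ranges_py get_byte_ranges_py_alt
  set btr := bytes_to_read.getD filesize with hbtr
  by_cases hle : btr ≤ 0
  · simp only [hle, if_true]
    rw [goA]
    simp [show ¬ btr > 0 by omega]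
  · have hps : 0 < part_size := by
      rcases hpre with h | h
      · exact h
      · omega
    simp only [hle, if_false]
    rw [goA_spec part_size hps (btr.toNat + 1) btr (by omega) start []]
    simp [cdiv]
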